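-- pv_equiv track=rewrite | github.com/mvjacobs/Crone | ArticleProcessor/Analyzing/ArticleAnalysis.py | get_article_emoticon_sentiment
-- ===== SOURCE A (Python) =====
-- def get_article_emoticon_sentiment(tokens):
--     positive_emoticons = [':)', ':-)', ':=)', ':D', ':-D', ':=D', '^_^', ';)', ';-)', ';=)']
--     negative_emoticons = [':(', ':-(', ':=(', ":'(", ';(', ';-(', ';=(']
--
--     score = 0
--     for token in tokens:
--         if token in positive_emoticons:
--             score += 1
--         if token in negative_emoticons:
--             score -= 1
--
--     return score
-- ===== SOURCE B (Python) =====
-- def get_article_emoticon_sentiment(tokens):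
--     positive_emoticons = [':)', ':-)', ':=)', ':D', ':-D', ':=D', '^_^', ';)', ';-)', ';=)']
--     negative_emoticons = [':(', ':-(', ':=(', ":'(", ';(', ';-(', ';=(']
--
--     counts = {}
--     for t in tokens:
--         counts[t] = counts.get(t, 0) + 1
--
--     return sum(counts.get(e, 0) for e in positive_emoticons) \
--          - sum(counts.get(e, 0) for e in negative_emoticons)
-- ===== Notes on version B (the rewrite author's own statement) =====
-- stated objective: alternative
-- what changed: B builds a frequency table of the tokens in one pass and then sums the counts of the 17 fixed emoticons, instead of scanning each token against the two emoticon lists.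
import Mathlib
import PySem

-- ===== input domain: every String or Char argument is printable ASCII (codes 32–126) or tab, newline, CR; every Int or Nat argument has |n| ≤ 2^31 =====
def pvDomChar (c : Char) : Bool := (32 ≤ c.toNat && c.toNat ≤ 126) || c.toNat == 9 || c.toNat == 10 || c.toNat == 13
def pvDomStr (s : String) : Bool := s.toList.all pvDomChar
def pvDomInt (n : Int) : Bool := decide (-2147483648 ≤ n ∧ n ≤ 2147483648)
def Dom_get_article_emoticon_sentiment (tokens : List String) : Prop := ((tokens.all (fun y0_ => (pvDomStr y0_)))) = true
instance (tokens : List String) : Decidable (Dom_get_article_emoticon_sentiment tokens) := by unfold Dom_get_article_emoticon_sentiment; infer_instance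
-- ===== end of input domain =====

-- B replaces per-token membership tests by a frequency table read off at the 17 fixed emoticons (alternative decomposition; return values proved equal).

-- ===== PORT A =====
def pvPosEmoticons : List String := [":)", ":-)", ":=)", ":D", ":-D", ":=D", "^_^", ";)", ";-)", ";=)"]
def pvNegEmoticons : List String := [":(", ":-(", ":=(", ":'(", ";(", ";-(", ";=("]

def get_article_emoticon_sentiment (tokens : List String) : Int :=
  tokens.foldl (fun score token =>
    let score := if pvPosEmoticons.contains token then score + 1 else score
    if pvNegEmoticons.contains token then score - 1 else score) 0

-- ===== PORT B =====
def get_article_emoticon_sentiment_alt (tokens : List String) : Int :=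
  let counts : PySem.Dict String Int :=
    tokens.foldl (fun d t => d.insert t (d.getD t 0 + 1)) PySem.Dict.empty
  (pvPosEmoticons.map (fun e => counts.getD e 0)).sum
    - (pvNegEmoticons.map (fun e => counts.getD e 0)).sum

-- ===== PRECONDITION & SPEC =====
def Spec_get_article_emoticon_sentiment (tokens : List String) (out : Int) : Prop := out = get_article_emoticon_sentiment_alt tokens
instance (tokens : List String) (out : Int) : Decidable (Spec_get_article_emoticon_sentiment tokens out) := by unfold Spec_get_article_emoticon_sentiment; infer_instance

-- ===== CLAIM (what is proved, stated in full; the proofs are below) =====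
def Claim_equal_get_article_emoticon_sentiment : Prop := ∀ (tokens : List String), Dom_get_article_emoticon_sentiment tokens → Spec_get_article_emoticon_sentiment tokens (get_article_emoticon_sentiment tokens)

-- ===== LEMMAS AND PROOFS =====

-- B's dict lookups are token counts.
lemma pvAlt_eq_counts (tokens : List String) :
    get_article_emoticon_sentiment_alt tokens
      = (pvPosEmoticons.map (fun e => (tokens.count e : Int))).sum
        - (pvNegEmoticons.map (fun e => (tokens.count e : Int))).sum := by
  simp [get_article_emoticon_sentiment_alt, PySem.Dict.getD_foldl_insert_add_one,
    PySem.Dict.getD_empty]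

lemma pvSum_count_cons (l : List String) (hl : l.Nodup) (t : String) (ts : List String) :
    (l.map (fun e => ((t :: ts).count e : Int))).sum
      = (l.map (fun e => (ts.count e : Int))).sum + (if l.contains t then 1 else 0) := by
  induction l with
  | nil => simp
  | cons a l ih =>
    have hal : a ∉ l := (List.nodup_cons.mp hl).1
    have hln : l.Nodup := (List.nodup_cons.mp hl).2
    simp only [List.map_cons, List.sum_cons, ih hln, List.contains_cons]
    by_cases hat : t = a
    · subst hat
      simp [List.count_cons_self, hal]
      ring
    · have h1 : (t :: ts).count a = ts.count a := by
        simp [List.count_cons]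
        exact fun h => absurd h.symm (fun h' => hat h'.symm)
      simp [h1, hat]
      ring

lemma pvLoop (ts : List String) : ∀ s : Int,
    ts.foldl (fun score token =>
      let score := if pvPosEmoticons.contains token then score + 1 else score
      if pvNegEmoticons.contains token then score - 1 else score) s
    = s + (pvPosEmoticons.map (fun e => (ts.count e : Int))).sum
        - (pvNegEmoticons.map (fun e => (ts.count e : Int))).sum := by
  induction ts with
  | nil => intro s; simp [pvPosEmoticons, pvNegEmoticons]
  | cons t ts ih =>
    intro s
    have hposnd : pvPosEmoticons.Nodup := by decide
    have hnegnd : pvNegEmoticons.Nodup := by decide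
    rw [List.foldl_cons, ih,
      pvSum_count_cons pvPosEmoticons hposnd t ts,
      pvSum_count_cons pvNegEmoticons hnegnd t ts]
    simp only [List.contains_eq_mem, decide_eq_true_eq] at *
    by_cases hp : t ∈ pvPosEmoticons <;> by_cases hn : t ∈ pvNegEmoticons <;>
      simp [hp, hn] <;> ring

-- ===== VERDICT (by name: the statement is the Claim_ definition above) =====
theorem get_article_emoticon_sentiment_spec : Claim_equal_get_article_emoticon_sentiment := by
  intro tokens _
  unfold Spec_get_article_emoticon_sentiment
  rw [pvAlt_eq_counts, get_article_emoticon_sentiment, pvLoop]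
  ring
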